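-- pv_equiv track=rewrite | github.com/Prasantchaudhary/python-projects | ticTacToe/main.py | updatecheckboard
-- ===== SOURCE A (Python) =====
-- def updatecheckboard(check_board, move, player):
--     for i in range(3):
--         for j in range(3):
--             if (3*i+j+1) == move:
--                 if check_board[i][j] == " ":
--                     check_board[i][j] = player
--                     return True
--     return False
-- ===== SOURCE B (Python) =====
-- def updatecheckboard(check_board, move, player):
--     if 1 <= move <= 9:
--         i, j = divmod(move - 1, 3)
--         if check_board[i][j] == " ":
--             check_board[i][j] = player
--             return True
--     return False
-- ===== Notes on version B (the rewrite author's own statement) =====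
-- stated objective: simpler
-- what changed: Replaces the 3x3 nested scan for the matching cell with direct index arithmetic i, j = divmod(move-1, 3) guarded by 1 <= move <= 9.
import Mathlib
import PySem

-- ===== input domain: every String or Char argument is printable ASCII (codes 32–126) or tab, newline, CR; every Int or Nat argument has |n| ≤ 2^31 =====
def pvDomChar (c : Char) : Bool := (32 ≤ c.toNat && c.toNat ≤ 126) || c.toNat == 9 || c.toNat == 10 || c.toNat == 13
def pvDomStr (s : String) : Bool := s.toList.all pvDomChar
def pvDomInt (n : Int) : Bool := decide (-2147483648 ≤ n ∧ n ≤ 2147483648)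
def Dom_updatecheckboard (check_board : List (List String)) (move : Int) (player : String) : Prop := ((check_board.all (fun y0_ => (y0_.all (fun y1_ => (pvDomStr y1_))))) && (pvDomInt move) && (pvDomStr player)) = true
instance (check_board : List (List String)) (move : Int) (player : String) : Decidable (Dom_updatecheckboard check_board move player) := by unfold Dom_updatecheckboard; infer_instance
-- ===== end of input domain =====

-- B replaces A's 3x3 nested scan with direct index arithmetic divmod(move-1,3); return-value equivalence
-- is proved (both programs also perform the identical in-place cell mutation in Python).


-- ===== PORT A =====
-- inner 'for j in range(3)': early-returns true on an empty matching cell, otherwise falls through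
def uInnerA (check_board : List (List String)) (move : Int) (i : Int) : List Int → Bool
  | [] => false
  | j :: js =>
    if 3 * i + j + 1 = move then
      if PySem.List.pyGetD (PySem.List.pyGetD check_board i []) j "" = " " then true
      else uInnerA check_board move i js
    else uInnerA check_board move i js

-- outer 'for i in range(3)'
def uOuterA (check_board : List (List String)) (move : Int) : List Int → Bool
  | [] => false
  | i :: is =>
    if uInnerA check_board move i (PySem.List.pyRange 0 3 1) then true
    else uOuterA check_board move is

-- indexing uses pyGetD; Pre_ guarantees the accessed index is in range, exactly where Python does not raise
def updatecheckboard (check_board : List (List String)) (move : Int) (player : String) : Bool :=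
  uOuterA check_board move (PySem.List.pyRange 0 3 1)

-- ===== PORT B =====
def updatecheckboard_alt (check_board : List (List String)) (move : Int) (player : String) : Bool :=
  if 1 ≤ move ∧ move ≤ 9 then
    let i := PySem.Int.floordiv (move - 1) 3
    let j := PySem.Int.mod (move - 1) 3
    if PySem.List.pyGetD (PySem.List.pyGetD check_board i []) j "" = " " then true else false
  else false

-- ===== PRECONDITION & SPEC =====
-- Pre_ excludes exactly the inputs where Python A (and B) raises IndexError: move in 1..9 but the
-- board lacks the one cell (move-1)//3, (move-1)%3 that is read.
def Pre_updatecheckboard (check_board : List (List String)) (move : Int) (player : String) : Prop :=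
  (1 ≤ move ∧ move ≤ 9) →
    (PySem.Raise.InRange check_board.length (PySem.Int.floordiv (move - 1) 3) ∧
     PySem.Raise.InRange (PySem.List.pyGetD check_board (PySem.Int.floordiv (move - 1) 3) []).length
       (PySem.Int.mod (move - 1) 3))
instance (check_board : List (List String)) (move : Int) (player : String) : Decidable (Pre_updatecheckboard check_board move player) := by unfold Pre_updatecheckboard; infer_instance

def pvWitness_updatecheckboard : List (List String) × Int × String :=
  ([[" ", "X", " "], ["O", " ", " "], [" ", " ", "X"]], 5, "X")

def Spec_updatecheckboard (check_board : List (List String)) (move : Int) (player : String) (out : Bool) : Prop := out = updatecheckboard_alt check_board move player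
instance (check_board : List (List String)) (move : Int) (player : String) (out : Bool) : Decidable (Spec_updatecheckboard check_board move player out) := by unfold Spec_updatecheckboard; infer_instance

-- ===== CLAIM (what is proved, stated in full; the proofs are below) =====
def Claim_equal_updatecheckboard : Prop := ∀ (check_board : List (List String)) (move : Int) (player : String), Dom_updatecheckboard check_board move player → Pre_updatecheckboard check_board move player → Spec_updatecheckboard check_board move player (updatecheckboard check_board move player)

-- ===== LEMMAS AND PROOFS =====
theorem pyRange03 : PySem.List.pyRange 0 3 1 = [0, 1, 2] := by decide

theorem inner_false (cb : List (List String)) (mv i : Int) :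
    ∀ js : List Int, (∀ j ∈ js, 3 * i + j + 1 ≠ mv) → uInnerA cb mv i js = false := by
  intro js
  induction js with
  | nil => intro _; rfl
  | cons j js ih =>
    intro h
    simp only [uInnerA]
    rw [if_neg (h j (List.mem_cons_self))]
    exact ih (fun j' hj' => h j' (List.mem_cons_of_mem _ hj'))

theorem outer_false (cb : List (List String)) (mv : Int) :
    ∀ is : List Int, (∀ i ∈ is, uInnerA cb mv i (PySem.List.pyRange 0 3 1) = false) →
      uOuterA cb mv is = false := by
  intro is
  induction is with
  | nil => intro _; rfl
  | cons i is ih =>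
    intro h
    simp only [uOuterA]
    rw [h i (List.mem_cons_self), if_neg (by simp)]
    exact ih (fun i' hi' => h i' (List.mem_cons_of_mem _ hi'))

theorem equal_main (check_board : List (List String)) (move : Int) (player : String) :
    updatecheckboard check_board move player = updatecheckboard_alt check_board move player := by
  by_cases h : 1 ≤ move ∧ move ≤ 9
  · obtain ⟨h1, h2⟩ := h
    interval_cases move <;>
      · simp only [updatecheckboard, updatecheckboard_alt, uOuterA, uInnerA, pyRange03]
        norm_num [PySem.Int.floordiv, PySem.Int.mod, Int.fdiv_eq_ediv, Int.fmod_eq_emod]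
  · rw [updatecheckboard, updatecheckboard_alt, if_neg h]
    refine outer_false check_board move _ (fun i hi => inner_false check_board move i _ (fun j hj => ?_))
    rw [pyRange03] at hi hj
    fin_cases hi <;> fin_cases hj <;> omega

-- ===== VERDICT (by name: the statement is the Claim_ definition above) =====
theorem updatecheckboard_spec : Claim_equal_updatecheckboard := by
  intro cb mv p _ _
  exact equal_main cb mv p
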